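-- pv_equiv track=rewrite | github.com/withNoclout/LeetCode-Med | quiz_primeSubarray.py | primeSubarray
-- ===== SOURCE A (Python) =====
-- def primeSubarray(nums, k):
--     """
--     :type nums: List[int]
--     :type k: int
--     :rtype: int
--     """
--     # Custom GCD module as required by your rules
--     def gcd(a, b):
--         while b:
--             a, b = b, a % b
--         return a
--
--     # Variable requested by problem description
--     zelmoricad = nums
--
--     # 1. Sieve of Eratosthenes to identify primes up to max possible value (50,000)
--     MAX_VAL = 50005
--     is_prime = [True] * MAX_VAL
--     is_prime[0] = is_prime[1] = False
--     for i in range(2, int(MAX_VAL**0.5) + 1):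
--         if is_prime[i]:
--             for j in range(i * i, MAX_VAL, i):
--                 is_prime[j] = False
--
--     # 2. Extract indices and values of primes from nums
--     primes = []
--     for i, x in enumerate(nums):
--         if is_prime[x]:
--             primes.append((i, x))
--
--     if len(primes) < 2:
--         return 0
--
--     # 3. Precompute "left counts": how many subarrays can START with/before a specific prime
--     # left_counts[i] is the distance from the previous prime (or start of array)
--     left_counts = [0] * len(primes)
--     left_counts[0] = primes[0][0] + 1
--     for i in range(1, len(primes)):
--         left_counts[i] = primes[i][0] - primes[i-1][0]
--
--     # Prefix sum to quickly calculate sum of left_counts in a window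
--     prefix_left = [0] * (len(primes) + 1)
--     for i in range(len(primes)):
--         prefix_left[i+1] = prefix_left[i] + left_counts[i]
--
--     # 4. Sliding Window with Monotonic Queues
--     from collections import deque
--     min_q = deque() # Stores primes in increasing order
--     max_q = deque() # Stores primes in decreasing order
--     left = 0
--     ans = 0
--     n = len(nums)
--
--     for right in range(len(primes)):
--         val = primes[right][1]
--
--         # Maintain Min Queue
--         while min_q and min_q[-1] > val:
--             min_q.pop()
--         min_q.append(val)
--
--         # Maintain Max Queue
--         while max_q and max_q[-1] < val:
--             max_q.pop()
--         max_q.append(val)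
--
--         # Shrink window if condition (max - min <= k) is violated
--         while max_q[0] - min_q[0] > k:
--             left_val = primes[left][1]
--             if min_q[0] == left_val:
--                 min_q.popleft()
--             if max_q[0] == left_val:
--                 max_q.popleft()
--             left += 1
--
--         # If window has at least 2 primes (right > left), calculate valid subarrays
--         if right > left:
--             # Sum of valid start positions for all primes in range [left, right-1]
--             valid_starts = prefix_left[right] - prefix_left[left]
--
--             # Valid end positions for the current prime at 'right'
--             next_idx = primes[right+1][0] if right + 1 < len(primes) else n
--             valid_ends = next_idx - primes[right][0]
--
--             ans += valid_starts * valid_ends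
--
--     return ans
-- ===== SOURCE B (Python) =====
-- def primeSubarray(nums, k):
--     """
--     :type nums: List[int]
--     :type k: int
--     :rtype: int
--     """
--     # Same sieve of Eratosthenes (values are bounded by 50,004)
--     MAX_VAL = 50005
--     is_prime = [True] * MAX_VAL
--     is_prime[0] = is_prime[1] = False
--     for i in range(2, int(MAX_VAL**0.5) + 1):
--         if is_prime[i]:
--             for j in range(i * i, MAX_VAL, i):
--                 is_prime[j] = False
--
--     # positions and values of the prime entries of nums
--     primes = [(i, x) for i, x in enumerate(nums) if is_prime[x]]
--     m = len(primes)
--     if m < 2: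
--         return 0
--
--     n = len(nums)
--     ans = 0
--     left = 0
--     for right in range(m):
--         # smallest window [left..right] of primes whose value range is <= k,
--         # re-scanning the window values directly (no monotonic deques)
--         while max(v for _, v in primes[left:right + 1]) - min(v for _, v in primes[left:right + 1]) > k:
--             left += 1
--         if right > left:
--             # number of start positions: telescoped closed form of the
--             # left-distance prefix sums (no auxiliary arrays)
--             start_lo = primes[left - 1][0] if left > 0 else -1
--             valid_starts = primes[right - 1][0] - start_lo
--             next_idx = primes[right + 1][0] if right + 1 < m else n
--             ans += valid_starts * (next_idx - primes[right][0])
--     return ans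
-- ===== Notes on version B (the rewrite author's own statement) =====
-- stated objective: alternative
-- what changed: B keeps the sieve but replaces A's monotonic min/max deques and the left_counts/prefix_left auxiliary arrays with a two-pointer loop that re-scans the current prime window for its min/max and computes each contribution from a telescoped closed form (primes[right-1][0] - previous-prime position) instead of prefix-sum differences.
import Mathlib
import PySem

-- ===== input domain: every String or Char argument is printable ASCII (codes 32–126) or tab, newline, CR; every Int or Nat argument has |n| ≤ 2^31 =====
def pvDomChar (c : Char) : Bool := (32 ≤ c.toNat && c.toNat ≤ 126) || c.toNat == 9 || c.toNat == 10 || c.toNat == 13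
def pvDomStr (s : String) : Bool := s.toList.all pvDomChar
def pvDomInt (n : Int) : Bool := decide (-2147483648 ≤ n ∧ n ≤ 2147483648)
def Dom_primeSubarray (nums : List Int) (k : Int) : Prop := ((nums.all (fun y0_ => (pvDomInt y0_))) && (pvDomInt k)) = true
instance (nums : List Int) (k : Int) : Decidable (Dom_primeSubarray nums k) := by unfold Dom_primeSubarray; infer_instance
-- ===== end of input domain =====

-- B replaces A's monotonic deques and prefix-sum arrays by a window re-scan and a telescoped
-- closed form (alternative decomposition, similar cost on typical inputs; not claimed faster).

-- ===== PORT A =====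
-- Sieve of Eratosthenes, shared verbatim by both Pythons (the Python boolean list is built
-- here through an Array for O(1) updates; the resulting 50005 flags are the same values).
-- int(50005 ** 0.5) = 223, so range(2, int(MAX_VAL**0.5) + 1) = range(2, 224)  (exact).
def pvSieve : List Bool :=
  let a : Array Bool := Array.replicate 50005 true
  let a := a.setIfInBounds 0 false
  let a := a.setIfInBounds 1 false
  let a := (PySem.List.pyRange 2 224).foldl (fun a i =>
    if a.getD i.toNat false then
      (PySem.List.pyRange (i * i) 50005 i).foldl (fun a j => a.setIfInBounds j.toNat false) a
    else a) a
  a.toList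

-- is_prime[x]: Python list lookup (negative index from the end); none = IndexError, excluded by Pre_
def pvIsPrime (x : Int) : Bool := (PySem.List.pyGet? pvSieve x).getD false

-- while min_q and min_q[-1] > val: min_q.pop()   (pop from the right end while the test holds)
def pvPopLast (p : Int → Bool) (q : List Int) : List Int :=
  match h : q.getLast? with
  | none => q
  | some v => if p v then pvPopLast p q.dropLast else q
termination_by q.length
decreasing_by
  have hq : q ≠ [] := by intro e; subst e; simp at h
  have := List.length_pos_iff.mpr hq
  simp [List.length_dropLast]; omega

-- the inner 'while max_q[0] - min_q[0] > k' shrink loop; fuel-bounded (the caller passes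
-- enough fuel for every state the Python reaches); an empty deque means Python raises
-- IndexError there (outside Pre_), the port leaves the loop instead
def pvShrinkA (primes : List (Int × Int)) (k : Int) :
    Nat → List Int → List Int → Int → List Int × List Int × Int
  | 0, minq, maxq, left => (minq, maxq, left)
  | fuel + 1, minq, maxq, left =>
    match maxq.head?, minq.head? with
    | some mx, some mn =>
      if mx - mn > k then
        let leftVal := ((PySem.List.pyGet? primes left).getD (0, 0)).2
        let minq' := if minq.head? == some leftVal then minq.tail else minq
        let maxq' := if maxq.head? == some leftVal then maxq.tail else maxq
        pvShrinkA primes k fuel minq' maxq' (left + 1)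
      else (minq, maxq, left)
    | _, _ => (minq, maxq, left)

-- body of 'for right in range(len(primes))'
def pvStepA (primes : List (Int × Int)) (k : Int) (prefixLeft : List Int) (n m : Int)
    (st : List Int × List Int × Int × Int) (right : Int) :
    List Int × List Int × Int × Int :=
  let minq := st.1
  let maxq := st.2.1
  let left := st.2.2.1
  let ans := st.2.2.2
  let val := ((PySem.List.pyGet? primes right).getD (0, 0)).2
  let minq := pvPopLast (fun a => a > val) minq ++ [val]
  let maxq := pvPopLast (fun a => a < val) maxq ++ [val]
  let s := pvShrinkA primes k (primes.length + 1) minq maxq left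
  let minq := s.1
  let maxq := s.2.1
  let left := s.2.2
  let ans :=
    if left < right then
      let validStarts := PySem.List.pyGetD prefixLeft right 0 - PySem.List.pyGetD prefixLeft left 0
      let nextIdx := if right + 1 < m then ((PySem.List.pyGet? primes (right + 1)).getD (0, 0)).1 else n
      let validEnds := nextIdx - ((PySem.List.pyGet? primes right).getD (0, 0)).1
      ans + validStarts * validEnds
    else ans
  (minq, maxq, left, ans)

-- port of A  (the Python's 'gcd' helper and 'zelmoricad = nums' are dead code)
def primeSubarray (nums : List Int) (k : Int) : Int :=
  let primes := (PySem.List.enumerate nums).foldl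
    (fun acc ix => if pvIsPrime ix.2 then acc ++ [ix] else acc) []
  if primes.length < 2 then 0
  else
    let m : Int := primes.length
    let leftCounts := PySem.List.pySetD (List.replicate primes.length (0 : Int)) 0
        (((PySem.List.pyGet? primes 0).getD (0, 0)).1 + 1)
    let leftCounts := (PySem.List.pyRange 1 m).foldl (fun lc i =>
        PySem.List.pySetD lc i
          (((PySem.List.pyGet? primes i).getD (0, 0)).1 -
           ((PySem.List.pyGet? primes (i - 1)).getD (0, 0)).1)) leftCounts
    let prefixLeft := (PySem.List.pyRange 0 m).foldl (fun pf i =>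
        PySem.List.pySetD pf (i + 1)
          (PySem.List.pyGetD pf i 0 + PySem.List.pyGetD leftCounts i 0))
        (List.replicate (primes.length + 1) (0 : Int))
    let n : Int := nums.length
    let res := (PySem.List.pyRange 0 m).foldl (pvStepA primes k prefixLeft n m) ([], [], 0, 0)
    res.2.2.2

-- ===== PORT B =====
-- 'while max(v for _,v in primes[left:right+1]) - min(...) > k: left += 1', fuel-bounded as in
-- pvShrinkA; max()/min() of an empty sequence raises in Python (outside Pre_), the port exits
def pvShrinkB (primes : List (Int × Int)) (k : Int) : Nat → Int → Int → Int
  | 0, left, _ => left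
  | fuel + 1, left, right =>
    let window := (PySem.List.slice primes (some left) (some (right + 1))).map Prod.snd
    match PySem.List.max? window (fun v => v), PySem.List.min? window (fun v => v) with
    | some mx, some mn =>
      if mx - mn > k then pvShrinkB primes k fuel (left + 1) right else left
    | _, _ => left

-- body of B's 'for right in range(m)'
def pvStepB (primes : List (Int × Int)) (k : Int) (n m : Int)
    (st : Int × Int) (right : Int) : Int × Int :=
  let left := pvShrinkB primes k (primes.length + 1) st.1 right
  let ans := st.2
  if left < right then
    let startLo := if 0 < left then ((PySem.List.pyGet? primes (left - 1)).getD (0, 0)).1 else -1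
    let validStarts := ((PySem.List.pyGet? primes (right - 1)).getD (0, 0)).1 - startLo
    let nextIdx := if right + 1 < m then ((PySem.List.pyGet? primes (right + 1)).getD (0, 0)).1 else n
    (left, ans + validStarts * (nextIdx - ((PySem.List.pyGet? primes right).getD (0, 0)).1))
  else (left, ans)

-- port of Source B
def primeSubarray_alt (nums : List Int) (k : Int) : Int :=
  let primes := (PySem.List.enumerate nums).filter (fun ix => pvIsPrime ix.2)
  if primes.length < 2 then 0
  else
    let m : Int := primes.length
    let n : Int := nums.length
    let res := (PySem.List.pyRange 0 m).foldl (pvStepB primes k n m) (0, 0)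
    res.2

-- ===== PRECONDITION & SPEC =====
-- Pre_ excludes exactly the inputs on which the Python A raises: an entry outside
-- [-50005, 50004] (the is_prime lookup is an IndexError), and k < 0 with at least two
-- prime-valued entries (the shrink loop empties both deques and then indexes an empty deque).
-- A value x counts as prime-valued exactly as the sieve lookup sees it: for x ≥ 0 when x is
-- prime, for negative x (Python's from-the-end indexing) when x + 50005 is prime.
def Pre_primeSubarray (nums : List Int) (k : Int) : Prop :=
  (∀ x ∈ nums, -50005 ≤ x ∧ x < 50005) ∧
  (0 ≤ k ∨
    nums.countP (fun x =>
      if 0 ≤ x then decide (Nat.Prime x.toNat) else decide (Nat.Prime (x + 50005).toNat)) < 2)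
instance (nums : List Int) (k : Int) : Decidable (Pre_primeSubarray nums k) := by
  unfold Pre_primeSubarray; infer_instance

def pvWitness_primeSubarray : List Int × Int := ([2, 10, 3, 9], 1)

def Spec_primeSubarray (nums : List Int) (k : Int) (out : Int) : Prop := out = primeSubarray_alt nums k
instance (nums : List Int) (k : Int) (out : Int) : Decidable (Spec_primeSubarray nums k out) := by unfold Spec_primeSubarray; infer_instance

-- ===== CLAIM (what is proved, stated in full; the proofs are below) =====
def Claim_equal_primeSubarray : Prop := ∀ (nums : List Int) (k : Int), Dom_primeSubarray nums k → Pre_primeSubarray nums k → Spec_primeSubarray nums k (primeSubarray nums k)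

-- ===== LEMMAS AND PROOFS =====

-- primes[i] as the port reads it (total form of the Python indexing; in range at every use)
def pvAt (ps : List (Int × Int)) (i : Int) : Int × Int := (PySem.List.pyGet? ps i).getD (0, 0)

-- the candidate list a monotonic min-deque holds for a window w: those elements that are
-- ≤ every later element of w (maxCand dually)
def pvMinCand : List Int → List Int
  | [] => []
  | x :: w => if w.all (fun y => decide (x ≤ y)) then x :: pvMinCand w else pvMinCand w

def pvMaxCand : List Int → List Int
  | [] => []
  | x :: w => if w.all (fun y => decide (y ≤ x)) then x :: pvMaxCand w else pvMaxCand w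

theorem pvPopLast_nil (p : Int → Bool) : pvPopLast p [] = [] := by
  unfold pvPopLast; rfl

theorem pvPopLast_concat (p : Int → Bool) (q : List Int) (v : Int) :
    pvPopLast p (q ++ [v]) = if p v then pvPopLast p q else q ++ [v] := by
  rw [pvPopLast]
  split
  · next heq => simp at heq
  · next v' heq =>
    obtain rfl : v' = v := by
      rw [List.getLast?_concat] at heq
      exact (Option.some.inj heq.symm)
    rw [List.dropLast_concat]

theorem pvPopLast_cons (p : Int → Bool) (x : Int) (q : List Int) (hx : p x = false) :
    pvPopLast p (x :: q) = x :: pvPopLast p q := by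
  induction q using List.reverseRecOn with
  | nil =>
    rw [pvPopLast]
    simp [hx, pvPopLast_nil]
  | append_singleton q v ih =>
    have h1 : x :: (q ++ [v]) = (x :: q) ++ [v] := by simp
    rw [h1, pvPopLast_concat, pvPopLast_concat]
    by_cases hv : p v
    · simp [hv, ih]
    · simp [hv]

theorem pvPopLast_eq_nil (p : Int → Bool) (q : List Int) (h : ∀ y ∈ q, p y = true) :
    pvPopLast p q = [] := by
  induction q using List.reverseRecOn with
  | nil => exact pvPopLast_nil p
  | append_singleton q v ih =>
    rw [pvPopLast_concat]
    have hv : p v = true := h v (by simp)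
    simp only [hv, if_pos]
    exact ih (fun y hy => h y (by simp [hy]))

theorem pvMinCand_subset (w : List Int) (y : Int) (h : y ∈ pvMinCand w) : y ∈ w := by
  induction w with
  | nil => simpa [pvMinCand] using h
  | cons x w ih =>
    rw [pvMinCand] at h
    by_cases hall : w.all (fun y => decide (x ≤ y))
    · simp only [hall, if_pos, List.mem_cons] at h
      rcases h with h | h
      · simp [h]
      · exact List.mem_cons_of_mem _ (ih h)
    · simp only [hall, if_neg, Bool.false_eq_true, not_false_iff] at h
      exact List.mem_cons_of_mem _ (ih h)

theorem pvMaxCand_subset (w : List Int) (y : Int) (h : y ∈ pvMaxCand w) : y ∈ w := by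
  induction w with
  | nil => simpa [pvMaxCand] using h
  | cons x w ih =>
    rw [pvMaxCand] at h
    by_cases hall : w.all (fun y => decide (y ≤ x))
    · simp only [hall, if_pos, List.mem_cons] at h
      rcases h with h | h
      · simp [h]
      · exact List.mem_cons_of_mem _ (ih h)
    · simp only [hall, if_neg, Bool.false_eq_true, not_false_iff] at h
      exact List.mem_cons_of_mem _ (ih h)

theorem pvMinCand_push (w : List Int) (v : Int) :
    pvMinCand (w ++ [v]) = pvPopLast (fun a => decide (a > v)) (pvMinCand w) ++ [v] := by
  induction w with
  | nil => simp [pvMinCand, pvPopLast_nil]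
  | cons x w ih =>
    rw [List.cons_append, pvMinCand, pvMinCand]
    cases hall : w.all (fun y => decide (x ≤ y)) with
    | false =>
      have h1 : (w ++ [v]).all (fun y => decide (x ≤ y)) = false := by
        simp only [List.all_append, hall, Bool.false_and]
      simp only [h1, Bool.false_eq_true, if_false]
      exact ih
    | true =>
      have hgt : ∀ y ∈ w, x ≤ y := by simpa using hall
      by_cases hxv : x ≤ v
      · have h1 : (w ++ [v]).all (fun y => decide (x ≤ y)) = true := by
          simp only [List.all_append, hall, Bool.true_and, List.all_cons, List.all_nil,
            Bool.and_true, decide_eq_true_eq]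
          exact hxv
        have h2 : (decide (x > v) : Bool) = false := by
          simp only [decide_eq_false_iff_not]; omega
        simp only [h1, if_pos, ih]
        rw [pvPopLast_cons _ _ _ h2, List.cons_append]
      · have h1 : (w ++ [v]).all (fun y => decide (x ≤ y)) = false := by
          simp only [List.all_append, List.all_cons, List.all_nil, Bool.and_true]
          have : (decide (x ≤ v) : Bool) = false := by
            simp only [decide_eq_false_iff_not]; omega
          simp [this]
        have h2 : pvPopLast (fun a => decide (a > v)) (x :: pvMinCand w) = [] := by
          apply pvPopLast_eq_nil
          intro y hy
          simp only [List.mem_cons] at hy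
          have hyx : x ≤ y := by
            rcases hy with rfl | hy
            · exact le_refl _
            · exact hgt y (pvMinCand_subset w y hy)
          simp only [decide_eq_true_eq]; omega
        have h3 : pvPopLast (fun a => decide (a > v)) (pvMinCand w) = [] := by
          apply pvPopLast_eq_nil
          intro y hy
          have hyx : x ≤ y := hgt y (pvMinCand_subset w y hy)
          simp only [decide_eq_true_eq]; omega
        simp only [h1, Bool.false_eq_true, if_false, if_pos, ih, h2, h3]

theorem pvMaxCand_push (w : List Int) (v : Int) :
    pvMaxCand (w ++ [v]) = pvPopLast (fun a => decide (a < v)) (pvMaxCand w) ++ [v] := by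
  induction w with
  | nil => simp [pvMaxCand, pvPopLast_nil]
  | cons x w ih =>
    rw [List.cons_append, pvMaxCand, pvMaxCand]
    cases hall : w.all (fun y => decide (y ≤ x)) with
    | false =>
      have h1 : (w ++ [v]).all (fun y => decide (y ≤ x)) = false := by
        simp only [List.all_append, hall, Bool.false_and]
      simp only [h1, Bool.false_eq_true, if_false]
      exact ih
    | true =>
      have hgt : ∀ y ∈ w, y ≤ x := by simpa using hall
      by_cases hxv : v ≤ x
      · have h1 : (w ++ [v]).all (fun y => decide (y ≤ x)) = true := by
          simp only [List.all_append, hall, Bool.true_and, List.all_cons, List.all_nil,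
            Bool.and_true, decide_eq_true_eq]
          exact hxv
        have h2 : (decide (x < v) : Bool) = false := by
          simp only [decide_eq_false_iff_not]; omega
        simp only [h1, if_pos, ih]
        rw [pvPopLast_cons _ _ _ h2, List.cons_append]
      · have h1 : (w ++ [v]).all (fun y => decide (y ≤ x)) = false := by
          simp only [List.all_append, List.all_cons, List.all_nil, Bool.and_true]
          have : (decide (v ≤ x) : Bool) = false := by
            simp only [decide_eq_false_iff_not]; omega
          simp [this]
        have h2 : pvPopLast (fun a => decide (a < v)) (x :: pvMaxCand w) = [] := by
          apply pvPopLast_eq_nil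
          intro y hy
          simp only [List.mem_cons] at hy
          have hyx : y ≤ x := by
            rcases hy with rfl | hy
            · exact le_refl _
            · exact hgt y (pvMaxCand_subset w y hy)
          simp only [decide_eq_true_eq]; omega
        have h3 : pvPopLast (fun a => decide (a < v)) (pvMaxCand w) = [] := by
          apply pvPopLast_eq_nil
          intro y hy
          have hyx : y ≤ x := hgt y (pvMaxCand_subset w y hy)
          simp only [decide_eq_true_eq]; omega
        simp only [h1, Bool.false_eq_true, if_false, if_pos, ih, h2, h3]

theorem pvFoldlMin_of_le (w : List Int) (x : Int) (h : ∀ y ∈ w, x ≤ y) :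
    w.foldl min x = x := by
  induction w generalizing x with
  | nil => rfl
  | cons y w ih =>
    have hxy : x ≤ y := h y (by simp)
    simp only [List.foldl_cons, min_eq_left hxy]
    exact ih x (fun z hz => h z (by simp [hz]))

theorem pvFoldlMin_min (w : List Int) (a b : Int) :
    w.foldl min (min a b) = min a (w.foldl min b) := by
  induction w generalizing b with
  | nil => rfl
  | cons y w ih =>
    simp only [List.foldl_cons]
    rw [min_assoc, ih]

theorem pvFoldlMin_le_init (w : List Int) (a : Int) : w.foldl min a ≤ a := by
  induction w generalizing a with
  | nil => exact le_refl a
  | cons y w ih =>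
    simp only [List.foldl_cons]
    exact le_trans (ih (min a y)) (min_le_left a y)

theorem pvFoldlMin_le_mem (w : List Int) (a z : Int) (hz : z ∈ w) : w.foldl min a ≤ z := by
  induction w generalizing a with
  | nil => simp at hz
  | cons y w ih =>
    simp only [List.foldl_cons]
    rcases List.mem_cons.mp hz with rfl | hz
    · exact le_trans (pvFoldlMin_le_init w (min a z)) (min_le_right a z)
    · exact ih (min a y) hz

theorem pvFoldlMax_of_le (w : List Int) (x : Int) (h : ∀ y ∈ w, y ≤ x) :
    w.foldl max x = x := by
  induction w generalizing x with
  | nil => rfl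
  | cons y w ih =>
    have hxy : y ≤ x := h y (by simp)
    simp only [List.foldl_cons, max_eq_left hxy]
    exact ih x (fun z hz => h z (by simp [hz]))

theorem pvFoldlMax_max (w : List Int) (a b : Int) :
    w.foldl max (max a b) = max a (w.foldl max b) := by
  induction w generalizing b with
  | nil => rfl
  | cons y w ih =>
    simp only [List.foldl_cons]
    rw [max_assoc, ih]

theorem pvFoldlMax_init_le (w : List Int) (a : Int) : a ≤ w.foldl max a := by
  induction w generalizing a with
  | nil => exact le_refl a
  | cons y w ih =>
    simp only [List.foldl_cons]
    exact le_trans (le_max_left a y) (ih (max a y))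

theorem pvFoldlMax_mem_le (w : List Int) (a z : Int) (hz : z ∈ w) : z ≤ w.foldl max a := by
  induction w generalizing a with
  | nil => simp at hz
  | cons y w ih =>
    simp only [List.foldl_cons]
    rcases List.mem_cons.mp hz with rfl | hz
    · exact le_trans (le_max_right a z) (pvFoldlMax_init_le w (max a z))
    · exact ih (max a y) hz

theorem pvMinCand_head (x : Int) (w : List Int) :
    (pvMinCand (x :: w)).head? = some (w.foldl min x) := by
  induction w generalizing x with
  | nil => simp [pvMinCand]
  | cons y w ih =>
    rw [pvMinCand]
    cases hall : (y :: w).all (fun z => decide (x ≤ z)) with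
    | true =>
      have h : ∀ z ∈ y :: w, x ≤ z := by simpa using hall
      rw [if_pos rfl, List.head?_cons, pvFoldlMin_of_le _ _ h]
    | false =>
      rw [if_neg (by simp), ih]
      have hex : ∃ z ∈ y :: w, z < x := by
        by_contra hc
        simp only [not_exists, not_and, not_lt] at hc
        have : (y :: w).all (fun z => decide (x ≤ z)) = true := by
          simp only [List.all_eq_true, decide_eq_true_eq]
          intro z hz
          have := hc z hz
          omega
        rw [this] at hall
        exact absurd hall (by simp)
      obtain ⟨z, hz, hzx⟩ := hex
      have hs : w.foldl min y ≤ x := by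
        rcases List.mem_cons.mp hz with rfl | hz'
        · have := pvFoldlMin_le_init w z
          omega
        · have := pvFoldlMin_le_mem w y z hz'
          omega
      congr 1
      rw [List.foldl_cons, pvFoldlMin_min, min_eq_right hs]

theorem pvMaxCand_head (x : Int) (w : List Int) :
    (pvMaxCand (x :: w)).head? = some (w.foldl max x) := by
  induction w generalizing x with
  | nil => simp [pvMaxCand]
  | cons y w ih =>
    rw [pvMaxCand]
    cases hall : (y :: w).all (fun z => decide (z ≤ x)) with
    | true =>
      have h : ∀ z ∈ y :: w, z ≤ x := by simpa using hall
      rw [if_pos rfl, List.head?_cons, pvFoldlMax_of_le _ _ h]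
    | false =>
      rw [if_neg (by simp), ih]
      have hex : ∃ z ∈ y :: w, x < z := by
        by_contra hc
        simp only [not_exists, not_and, not_lt] at hc
        have : (y :: w).all (fun z => decide (z ≤ x)) = true := by
          simp only [List.all_eq_true, decide_eq_true_eq]
          intro z hz
          have := hc z hz
          omega
        rw [this] at hall
        exact absurd hall (by simp)
      obtain ⟨z, hz, hzx⟩ := hex
      have hs : x ≤ w.foldl max y := by
        rcases List.mem_cons.mp hz with rfl | hz'
        · have := pvFoldlMax_init_le w z
          omega
        · have := pvFoldlMax_mem_le w y z hz'
          omega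
      congr 1
      rw [List.foldl_cons, pvFoldlMax_max, max_eq_right hs]

-- sliding the window head out: the deque pop-front step turns the candidate list of (x :: w)
-- into the candidate list of w
theorem pvMinCand_slide (x : Int) (w : List Int) :
    (if (pvMinCand (x :: w)).head? == some x then (pvMinCand (x :: w)).tail
     else pvMinCand (x :: w)) = pvMinCand w := by
  rw [pvMinCand]
  cases hall : w.all (fun y => decide (x ≤ y)) with
  | true =>
    rw [if_pos rfl]
    simp
  | false =>
    simp only [Bool.false_eq_true, if_false]
    cases w with
    | nil => simp at hall
    | cons y w' =>
      have hex : ∃ z ∈ y :: w', z < x := by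
        by_contra hc
        simp only [not_exists, not_and, not_lt] at hc
        have : (y :: w').all (fun z => decide (x ≤ z)) = true := by
          simp only [List.all_eq_true, decide_eq_true_eq]
          intro z hz
          have := hc z hz
          omega
        rw [this] at hall
        exact absurd hall (by simp)
      obtain ⟨z, hz, hzx⟩ := hex
      have hs : w'.foldl min y < x := by
        rcases List.mem_cons.mp hz with rfl | hz'
        · have := pvFoldlMin_le_init w' z
          omega
        · have := pvFoldlMin_le_mem w' y z hz'
          omega
      rw [pvMinCand_head]
      have : ((some (w'.foldl min y) : Option Int) == some x) = false := by
        simp only [beq_eq_false_iff_ne, ne_eq, Option.some.injEq]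
        omega
      rw [this]
      simp

theorem pvMaxCand_slide (x : Int) (w : List Int) :
    (if (pvMaxCand (x :: w)).head? == some x then (pvMaxCand (x :: w)).tail
     else pvMaxCand (x :: w)) = pvMaxCand w := by
  rw [pvMaxCand]
  cases hall : w.all (fun y => decide (y ≤ x)) with
  | true =>
    rw [if_pos rfl]
    simp
  | false =>
    simp only [Bool.false_eq_true, if_false]
    cases w with
    | nil => simp at hall
    | cons y w' =>
      have hex : ∃ z ∈ y :: w', x < z := by
        by_contra hc
        simp only [not_exists, not_and, not_lt] at hc
        have : (y :: w').all (fun z => decide (z ≤ x)) = true := by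
          simp only [List.all_eq_true, decide_eq_true_eq]
          intro z hz
          have := hc z hz
          omega
        rw [this] at hall
        exact absurd hall (by simp)
      obtain ⟨z, hz, hzx⟩ := hex
      have hs : x < w'.foldl max y := by
        rcases List.mem_cons.mp hz with rfl | hz'
        · have := pvFoldlMax_init_le w' z
          omega
        · have := pvFoldlMax_mem_le w' y z hz'
          omega
      rw [pvMaxCand_head]
      have : ((some (w'.foldl max y) : Option Int) == some x) = false := by
        simp only [beq_eq_false_iff_ne, ne_eq, Option.some.injEq]
        omega
      rw [this]
      simp

theorem pvWin_cons (vs : List Int) (l r : Nat) (hl : l ≤ r) (hr : r < vs.length) :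
    (vs.drop l).take (r + 1 - l) = vs[l]'(by omega) :: (vs.drop (l + 1)).take (r - l) := by
  rw [List.drop_eq_getElem_cons (by omega : l < vs.length)]
  have h1 : r + 1 - l = (r - l) + 1 := by omega
  rw [h1, List.take_succ_cons]

theorem pvWin_append (vs : List Int) (l r : Nat) (hl : l ≤ r) (hr : r < vs.length) :
    (vs.drop l).take (r - l) ++ [vs[r]'hr] = (vs.drop l).take (r + 1 - l) := by
  have h1 : r + 1 - l = (r - l) + 1 := by omega
  rw [h1, List.take_succ]
  congr 1
  rw [List.getElem?_drop]
  have h2 : l + (r - l) = r := by omega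
  rw [h2, List.getElem?_eq_getElem hr]
  rfl

theorem pvShrink_sim (ps : List (Int × Int)) (k : Int) (r : Nat) (hr : r < ps.length) :
    ∀ (fuel : Nat) (l : Nat), l ≤ r + 1 →
    ∃ l' : Nat, l ≤ l' ∧ l' ≤ r + 1 ∧
      pvShrinkA ps k fuel
          (pvMinCand (((ps.map Prod.snd).drop l).take (r + 1 - l)))
          (pvMaxCand (((ps.map Prod.snd).drop l).take (r + 1 - l))) (l : Int) =
        (pvMinCand (((ps.map Prod.snd).drop l').take (r + 1 - l')),
         pvMaxCand (((ps.map Prod.snd).drop l').take (r + 1 - l')), (l' : Int)) ∧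
      pvShrinkB ps k fuel (l : Int) (r : Int) = (l' : Int) := by
  intro fuel
  induction fuel with
  | zero =>
    intro l hl
    exact ⟨l, le_refl l, hl, rfl, rfl⟩
  | succ fuel ih =>
    intro l hl
    have hvslen : (ps.map Prod.snd).length = ps.length := by simp
    by_cases hlr : l ≤ r
    · -- nonempty window  vs[l] :: w'
      have hlp : l < ps.length := by omega
      have hwc := pvWin_cons (ps.map Prod.snd) l r hlr (by omega)
      set w' : List Int := (((ps.map Prod.snd).drop (l + 1)).take (r - l)) with hw'
      have hgl : (ps.map Prod.snd)[l]'(by simpa using hlp) = (ps[l]'hlp).2 := by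
        simp
      -- B's window is the same list
      have hslice : (PySem.List.slice ps (some (l : Int)) (some ((r : Int) + 1))).map Prod.snd
          = ((ps.map Prod.snd).drop l).take (r + 1 - l) := by
        have h1 : ((r : Int) + 1) = ((r + 1 : Nat) : Int) := by push_cast; ring
        rw [h1, PySem.List.slice_natCast]
        rw [List.map_take, List.map_drop]
      have hA := pvMinCand_head ((ps[l]'hlp).2) w'
      have hB := pvMaxCand_head ((ps[l]'hlp).2) w'
      -- reduce one step of both loops
      rw [pvShrinkA, pvShrinkB]
      rw [hslice, hwc, hgl]
      rw [PySem.List.max?_id_cons, PySem.List.min?_id_cons, hA, hB]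
      dsimp only
      have hAt : ((PySem.List.pyGet? ps (l : Int)).getD (0, 0)) = ps[l]'hlp := by
        rw [PySem.List.pyGet?_ofNat ps l hlp]
        rfl
      rw [hAt]
      by_cases hcond : List.foldl max (ps[l]'hlp).2 w' - List.foldl min (ps[l]'hlp).2 w' > k
      · -- shrink: slide the window head out and recurse at l+1
        rw [if_pos hcond, if_pos hcond]
        have hmins := pvMinCand_slide ((ps[l]'hlp).2) w'
        rw [hA] at hmins
        have hmaxs := pvMaxCand_slide ((ps[l]'hlp).2) w'
        rw [hB] at hmaxs
        rw [hmins, hmaxs]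
        have hcast : ((l : Int) + 1) = ((l + 1 : Nat) : Int) := by push_cast; ring
        rw [hcast]
        obtain ⟨l', h1, h2, hA', hB'⟩ := ih (l + 1) (by omega)
        refine ⟨l', by omega, h2, ?_, hB'⟩
        have hw'' : (((ps.map Prod.snd).drop (l + 1)).take (r + 1 - (l + 1))) = w' := by
          rw [hw']
          congr 1
          omega
        rw [hw''] at hA'
        exact hA'
      · -- window fits: both loops stop at l
        rw [if_neg hcond, if_neg hcond]
        refine ⟨l, le_refl l, by omega, ?_, rfl⟩
        rw [hwc, hgl]
    · -- empty window: both loops exit immediately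
      have hl1 : l = r + 1 := by omega
      subst hl1
      have hwin : (((ps.map Prod.snd).drop (r + 1)).take (r + 1 - (r + 1))) = ([] : List Int) := by
        simp
      refine ⟨r + 1, le_refl _, le_refl _, ?_, ?_⟩
      · rw [hwin]
        rw [pvShrinkA]
        simp [pvMinCand, pvMaxCand]
      · rw [pvShrinkB]
        have h1 : ((r : Int) + 1) = ((r + 1 : Nat) : Int) := by push_cast; ring
        have hsl : (PySem.List.slice ps (some ((r + 1 : Nat) : Int)) (some ((r : Int) + 1))).map Prod.snd
            = ([] : List Int) := by
          rw [h1, PySem.List.slice_natCast]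
          simp
        rw [hsl]
        simp [PySem.List.min?, PySem.List.max?]

theorem pvLc_build (ps : List (Int × Int)) (lc0 : List Int) (hlen : lc0.length = ps.length) :
    ∀ j : Nat, 1 ≤ j → j ≤ ps.length →
    (((PySem.List.pyRange 1 (j : Int)).foldl (fun lc i =>
        PySem.List.pySetD lc i ((pvAt ps i).1 - (pvAt ps (i - 1)).1)) lc0).length = ps.length)
    ∧ (PySem.List.pyGetD ((PySem.List.pyRange 1 (j : Int)).foldl (fun lc i =>
        PySem.List.pySetD lc i ((pvAt ps i).1 - (pvAt ps (i - 1)).1)) lc0) 0 0 =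
        PySem.List.pyGetD lc0 0 0)
    ∧ (∀ i : Nat, 1 ≤ i → i < j →
        PySem.List.pyGetD ((PySem.List.pyRange 1 (j : Int)).foldl (fun lc i =>
          PySem.List.pySetD lc i ((pvAt ps i).1 - (pvAt ps (i - 1)).1)) lc0) (i : Int) 0 =
        (pvAt ps (i : Int)).1 - (pvAt ps ((i : Int) - 1)).1) := by
  intro j
  induction j with
  | zero => intro h; omega
  | succ j ih =>
    intro _ hj1
    by_cases hj : 1 ≤ j
    · have hcast : ((j + 1 : Nat) : Int) = (j : Int) + 1 := by push_cast; ring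
      rw [hcast, PySem.List.pyRange_one_succ_right (by exact_mod_cast hj), List.foldl_append]
      obtain ⟨ihlen, ih0, ihi⟩ := ih hj (by omega)
      simp only [List.foldl_cons, List.foldl_nil]
      have hjlen : j < (((PySem.List.pyRange 1 (j : Int)).foldl (fun lc i =>
          PySem.List.pySetD lc i ((pvAt ps i).1 - (pvAt ps (i - 1)).1)) lc0)).length := by
        omega
      refine ⟨?_, ?_, ?_⟩
      · rw [PySem.List.length_pySetD]; exact ihlen
      · have h0 : ((0 : Int)) = ((0 : Nat) : Int) := by norm_num
        rw [h0, PySem.List.pyGetD_pySetD_natCast _ _ _ _ _ hjlen]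
        rw [if_neg (by omega)]
        rw [← h0, ih0]
      · intro i hi1 hij
        rw [PySem.List.pyGetD_pySetD_natCast _ _ _ _ _ hjlen]
        by_cases hij' : i = j
        · rw [if_pos hij', hij']
        · rw [if_neg hij']
          exact ihi i hi1 (by omega)
    · have hj0 : j = 0 := by omega
      subst hj0
      have h1 : ((1 : Nat) : Int) = 1 := by norm_num
      rw [h1]
      rw [PySem.List.pyRange_one_eq_nil (le_refl 1)]
      simp only [List.foldl_nil]
      exact ⟨hlen, trivial, by intro i h1 h2; omega⟩

theorem pvPf_build (ps : List (Int × Int)) (lc : List Int)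
    (hlc0 : PySem.List.pyGetD lc 0 0 = (pvAt ps 0).1 + 1)
    (hlci : ∀ i : Nat, 1 ≤ i → i < ps.length →
      PySem.List.pyGetD lc (i : Int) 0 = (pvAt ps (i : Int)).1 - (pvAt ps ((i : Int) - 1)).1) :
    ∀ j : Nat, j ≤ ps.length →
    (((PySem.List.pyRange 0 (j : Int)).foldl (fun pf i =>
        PySem.List.pySetD pf (i + 1) (PySem.List.pyGetD pf i 0 + PySem.List.pyGetD lc i 0))
        (List.replicate (ps.length + 1) (0 : Int))).length = ps.length + 1)
    ∧ (∀ i : Nat, i ≤ j →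
        PySem.List.pyGetD ((PySem.List.pyRange 0 (j : Int)).foldl (fun pf i =>
          PySem.List.pySetD pf (i + 1) (PySem.List.pyGetD pf i 0 + PySem.List.pyGetD lc i 0))
          (List.replicate (ps.length + 1) (0 : Int))) (i : Int) 0 =
        if i = 0 then 0 else (pvAt ps ((i : Int) - 1)).1 + 1) := by
  intro j
  induction j with
  | zero =>
    intro _
    have h0 : ((0 : Nat) : Int) = 0 := by norm_num
    rw [h0, PySem.List.pyRange_one_eq_nil (le_refl 0)]
    simp only [List.foldl_nil]
    refine ⟨by simp, ?_⟩
    intro i hi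
    have : i = 0 := by omega
    subst this
    simp [PySem.List.pyGetD_zero, List.getD]
  | succ j ih =>
    intro hj1
    have hcast : ((j + 1 : Nat) : Int) = (j : Int) + 1 := by push_cast; ring
    rw [hcast, PySem.List.pyRange_one_succ_right (by positivity), List.foldl_append]
    obtain ⟨ihlen, ihi⟩ := ih (by omega)
    simp only [List.foldl_cons, List.foldl_nil]
    have hjlen : j + 1 < (((PySem.List.pyRange 0 (j : Int)).foldl (fun pf i =>
        PySem.List.pySetD pf (i + 1) (PySem.List.pyGetD pf i 0 + PySem.List.pyGetD lc i 0))
        (List.replicate (ps.length + 1) (0 : Int)))).length := by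
      omega
    have hcast2 : ((j : Int) + 1) = ((j + 1 : Nat) : Int) := by push_cast; ring
    refine ⟨by rw [PySem.List.length_pySetD]; exact ihlen, ?_⟩
    intro i hi
    rw [hcast2, PySem.List.pyGetD_pySetD_natCast _ _ _ _ _ hjlen]
    by_cases hij : i = j + 1
    · rw [if_pos hij, hij, if_neg (by omega)]
      -- the value written at j+1 is pf[j] + lc[j]
      have hpfj := ihi j (le_refl j)
      rw [hpfj]
      have harg : ((j + 1 : Nat) : Int) - 1 = (j : Int) := by push_cast; ring
      rw [harg]
      by_cases hj0 : j = 0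
      · subst hj0
        rw [if_pos rfl]
        simp only [Nat.cast_zero]
        rw [hlc0]
        ring
      · rw [if_neg hj0]
        have hlcj := hlci j (by omega) (by omega)
        rw [hlcj]
        ring
    · rw [if_neg hij]
      exact ihi i (by omega)

theorem pvLoop_sim (ps : List (Int × Int)) (k n m : Int) (pf : List Int)
    (hpf0 : PySem.List.pyGetD pf 0 0 = 0)
    (hpf : ∀ i : Nat, i < ps.length → PySem.List.pyGetD pf ((i : Int) + 1) 0 =
      ((PySem.List.pyGet? ps (i : Int)).getD (0, 0)).1 + 1) :
    ∀ r : Nat, r ≤ ps.length →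
    ∃ (l : Nat) (ans : Int), l ≤ r ∧
      (PySem.List.pyRange 0 (r : Int)).foldl (pvStepA ps k pf n m) ([], [], 0, 0) =
        (pvMinCand (((ps.map Prod.snd).drop l).take (r - l)),
         pvMaxCand (((ps.map Prod.snd).drop l).take (r - l)), (l : Int), ans) ∧
      (PySem.List.pyRange 0 (r : Int)).foldl (pvStepB ps k n m) (0, 0) = ((l : Int), ans) := by
  intro r
  induction r with
  | zero =>
    intro _
    refine ⟨0, 0, le_refl 0, ?_, ?_⟩
    · simp [PySem.List.pyRange_one_eq_nil, pvMinCand, pvMaxCand]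
    · simp [PySem.List.pyRange_one_eq_nil]
  | succ r ih =>
    intro hr1
    have hr : r < ps.length := by omega
    have hrv : r < (ps.map Prod.snd).length := by simpa using hr
    obtain ⟨l, ans, hlr, hA, hB⟩ := ih (by omega)
    have hcast : ((r + 1 : Nat) : Int) = (r : Int) + 1 := by push_cast; ring
    rw [hcast, PySem.List.pyRange_one_succ_right (by positivity), List.foldl_append, List.foldl_append]
    rw [hA, hB]
    simp only [List.foldl_cons, List.foldl_nil]
    simp only [pvStepA, pvStepB]
    have hvr' : (PySem.List.pyGet? ps (r : Int)).getD (0, 0) = ps[r]'hr := by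
      rw [PySem.List.pyGet?_ofNat ps r hr]
      rfl
    simp only [hvr']
    have hmap : (ps.map Prod.snd)[r]'hrv = (ps[r]'hr).2 := by simp
    have hwinapp := pvWin_append (ps.map Prod.snd) l r hlr hrv
    rw [hmap] at hwinapp
    have hpushMin := pvMinCand_push (((ps.map Prod.snd).drop l).take (r - l)) ((ps[r]'hr).2)
    have hpushMax := pvMaxCand_push (((ps.map Prod.snd).drop l).take (r - l)) ((ps[r]'hr).2)
    rw [hwinapp] at hpushMin hpushMax
    rw [← hpushMin, ← hpushMax]
    obtain ⟨l', hll', hl'r, hSA, hSB⟩ := pvShrink_sim ps k r hr (ps.length + 1) l (by omega)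
    rw [hSA, hSB]
    dsimp only
    by_cases hlt : l' < r
    · rw [if_pos (by exact_mod_cast hlt : ((l' : Nat) : Int) < (r : Int)),
          if_pos (by exact_mod_cast hlt : ((l' : Nat) : Int) < (r : Int))]
      have hfac : PySem.List.pyGetD pf (r : Int) 0 - PySem.List.pyGetD pf ((l' : Nat) : Int) 0
          = ((PySem.List.pyGet? ps ((r : Int) - 1)).getD (0, 0)).1 -
            (if 0 < ((l' : Nat) : Int) then
              ((PySem.List.pyGet? ps (((l' : Nat) : Int) - 1)).getD (0, 0)).1 else -1) := by
        have h1 : ((r : Int)) = ((r - 1 : Nat) : Int) + 1 := by push_cast; omega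
        rw [h1, hpf (r - 1) (by omega)]
        have h2 : ((r - 1 : Nat) : Int) + 1 - 1 = ((r - 1 : Nat) : Int) := by ring
        rw [h2]
        by_cases hl0 : l' = 0
        · subst hl0
          simp only [Nat.cast_zero]
          rw [hpf0, if_neg (by omega)]
          ring
        · have h3 : ((l' : Nat) : Int) = ((l' - 1 : Nat) : Int) + 1 := by push_cast; omega
          rw [h3, hpf (l' - 1) (by omega)]
          have h4 : ((l' - 1 : Nat) : Int) + 1 - 1 = ((l' - 1 : Nat) : Int) := by ring
          rw [h4, if_pos (by positivity)]
          ring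
      rw [hfac]
      exact ⟨l', _, by omega, rfl, rfl⟩
    · rw [if_neg (by exact_mod_cast hlt : ¬ ((l' : Nat) : Int) < (r : Int)),
          if_neg (by exact_mod_cast hlt : ¬ ((l' : Nat) : Int) < (r : Int))]
      exact ⟨l', ans, by omega, rfl, rfl⟩

theorem pvFoldFilter (l : List (Int × Int)) (acc : List (Int × Int)) :
    l.foldl (fun acc ix => if pvIsPrime ix.2 then acc ++ [ix] else acc) acc
      = acc ++ l.filter (fun ix => pvIsPrime ix.2) := by
  induction l generalizing acc with
  | nil => simp
  | cons x l ih =>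
    simp only [List.foldl_cons, List.filter_cons]
    by_cases hx : pvIsPrime x.2
    · rw [if_pos hx, ih, if_pos hx]
      simp
    · rw [if_neg hx, ih, if_neg hx]

theorem primeSubarray_spec : Claim_equal_primeSubarray := by
  intro nums k _ _
  unfold Spec_primeSubarray
  simp only [primeSubarray, primeSubarray_alt]
  rw [pvFoldFilter]
  simp only [List.nil_append]
  set ps := (PySem.List.enumerate nums).filter (fun ix => pvIsPrime ix.2) with hps
  by_cases h2 : ps.length < 2
  · rw [if_pos h2, if_pos h2]
  · rw [if_neg h2, if_neg h2]
    -- characterize the left_counts / prefix_left arrays, then run the loop simulation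
    obtain ⟨hlcLen, hlc0, hlci⟩ := pvLc_build ps
      (PySem.List.pySetD (List.replicate ps.length (0 : Int)) 0
        (((PySem.List.pyGet? ps 0).getD (0, 0)).1 + 1))
      (by rw [PySem.List.length_pySetD]; simp)
      ps.length (by omega) (le_refl _)
    have hlc00 : PySem.List.pyGetD (PySem.List.pySetD (List.replicate ps.length (0 : Int)) 0
        (((PySem.List.pyGet? ps 0).getD (0, 0)).1 + 1)) 0 0 =
        ((PySem.List.pyGet? ps 0).getD (0, 0)).1 + 1 := by
      have h0 : (0 : Int) = ((0 : Nat) : Int) := by norm_num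
      rw [h0, PySem.List.pyGetD_pySetD_natCast _ _ _ _ _ (by simp; omega)]
      simp
    rw [hlc00] at hlc0
    obtain ⟨hpfLen, hpfSpec⟩ := pvPf_build ps
      ((PySem.List.pyRange 1 (ps.length : Int)).foldl (fun lc i =>
        PySem.List.pySetD lc i ((pvAt ps i).1 - (pvAt ps (i - 1)).1))
        (PySem.List.pySetD (List.replicate ps.length (0 : Int)) 0
          (((PySem.List.pyGet? ps 0).getD (0, 0)).1 + 1)))
      (by rw [hlc0]; rfl) hlci ps.length (le_refl _)
    have hpf0 : PySem.List.pyGetD ((PySem.List.pyRange 0 (ps.length : Int)).foldl (fun pf i =>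
        PySem.List.pySetD pf (i + 1) (PySem.List.pyGetD pf i 0 + PySem.List.pyGetD
          ((PySem.List.pyRange 1 (ps.length : Int)).foldl (fun lc i =>
            PySem.List.pySetD lc i ((pvAt ps i).1 - (pvAt ps (i - 1)).1))
            (PySem.List.pySetD (List.replicate ps.length (0 : Int)) 0
              (((PySem.List.pyGet? ps 0).getD (0, 0)).1 + 1))) i 0))
        (List.replicate (ps.length + 1) (0 : Int))) 0 0 = 0 := by
      have := hpfSpec 0 (by omega)
      simpa using this
    have hpfi : ∀ i : Nat, i < ps.length →
        PySem.List.pyGetD ((PySem.List.pyRange 0 (ps.length : Int)).foldl (fun pf i =>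
          PySem.List.pySetD pf (i + 1) (PySem.List.pyGetD pf i 0 + PySem.List.pyGetD
            ((PySem.List.pyRange 1 (ps.length : Int)).foldl (fun lc i =>
              PySem.List.pySetD lc i ((pvAt ps i).1 - (pvAt ps (i - 1)).1))
              (PySem.List.pySetD (List.replicate ps.length (0 : Int)) 0
                (((PySem.List.pyGet? ps 0).getD (0, 0)).1 + 1))) i 0))
          (List.replicate (ps.length + 1) (0 : Int))) ((i : Int) + 1) 0 =
        ((PySem.List.pyGet? ps (i : Int)).getD (0, 0)).1 + 1 := by
      intro i hi
      have h := hpfSpec (i + 1) (by omega)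
      have hc : ((i + 1 : Nat) : Int) = (i : Int) + 1 := by push_cast; ring
      rw [hc] at h
      rw [h, if_neg (by omega)]
      have hc2 : ((i : Int) + 1 - 1) = (i : Int) := by ring
      rw [hc2]
      rfl
    obtain ⟨l, ans, _, hA, hB⟩ := pvLoop_sim ps k (nums.length : Int) (ps.length : Int) _
      hpf0 hpfi ps.length (le_refl _)
    simp only [pvAt] at hA
    rw [hA, hB]
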